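-- pv_equiv track=rewrite | github.com/preddybreddy/Coding-Bat-Recursion-Solutions | coding_bat_recusions_1_solutions.py | countHi2
-- ===== SOURCE A (Python) =====
-- def countHi2(str):
--     if len(str) < 2:
--         return 0
--
--     if str[0] == 'x':
--         start_index = 3 if len(str) > 2 else len(str)
--         return countHi2(str[start_index:])
--
--     if str[:2] == 'hi':
--         return 1 + countHi2(str[2:])
--     return countHi2(str[1:])
-- ===== SOURCE B (Python) =====
-- def countHi2(str):
--     # Single linear index scan instead of recursion on slices.
--     n = len(str)
--     i = 0
--     count = 0
--     while n - i >= 2: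
--         if str[i] == 'x':
--             i = i + 3 if n - i > 2 else n
--         elif str[i:i+2] == 'hi':
--             count += 1
--             i += 2
--         else:
--             i += 1
--     return count
-- ===== Notes on version B (the rewrite author's own statement) =====
-- stated objective: faster
-- what changed: Replaced the recursion that allocates a new slice at every step with a single iterative index scan keeping a counter, preserving the same skip-by-3/skip-to-end rule.
import Mathlib
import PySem

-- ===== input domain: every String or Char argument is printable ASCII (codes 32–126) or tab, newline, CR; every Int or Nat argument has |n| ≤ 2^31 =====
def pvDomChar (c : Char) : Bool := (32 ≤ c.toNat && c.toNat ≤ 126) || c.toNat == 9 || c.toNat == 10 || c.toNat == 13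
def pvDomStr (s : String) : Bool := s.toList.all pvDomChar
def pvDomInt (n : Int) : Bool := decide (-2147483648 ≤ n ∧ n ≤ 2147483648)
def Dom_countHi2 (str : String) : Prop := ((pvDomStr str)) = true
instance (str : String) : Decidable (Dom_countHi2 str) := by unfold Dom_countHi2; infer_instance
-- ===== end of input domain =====

-- B replaces A's slice-allocating recursion by one linear index scan with a counter (faster).

-- ===== PORT A =====
-- A's recursion on string slices, transcribed over the character list:
-- str[k:] for k ≥ 0 is List.drop k, str[:2] is List.take 2, str[0] is l[0]? (in range since length ≥ 2).
def countHi2A (l : List Char) : Int :=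
  if l.length < 2 then 0
  else if l[0]? = some 'x' then
    countHi2A (l.drop (if l.length > 2 then 3 else l.length))  -- start_index inlined
  else if l.take 2 = ['h', 'i'] then 1 + countHi2A (l.drop 2)
  else countHi2A (l.drop 1)
termination_by l.length
decreasing_by
  · simp_all only [not_lt, List.length_drop]; split <;> omega
  · simp_all; omega
  · simp_all; omega

def countHi2 (str : String) : Int := countHi2A str.toList

-- ===== PORT B =====
-- B's while-loop: index i, counter count; str[i] is l[i]?, str[i:i+2] is (drop i).take 2.
def countHi2Go (l : List Char) (n i : Nat) (count : Int) : Int :=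
  if n - i ≥ 2 then
    if l[i]? = some 'x' then
      countHi2Go l n (if n - i > 2 then i + 3 else n) count
    else if (l.drop i).take 2 = ['h', 'i'] then
      countHi2Go l n (i + 2) (count + 1)
    else countHi2Go l n (i + 1) count
  else count
termination_by n - i
decreasing_by
  · split <;> omega
  · omega
  · omega

def countHi2_alt (str : String) : Int := countHi2Go str.toList str.toList.length 0 0

-- ===== PRECONDITION & SPEC =====
def Spec_countHi2 (str : String) (out : Int) : Prop := out = countHi2_alt str
instance (str : String) (out : Int) : Decidable (Spec_countHi2 str out) := by unfold Spec_countHi2; infer_instance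

-- ===== CLAIM (what is proved, stated in full; the proofs are below) =====
def Claim_equal_countHi2 : Prop := ∀ (str : String), Dom_countHi2 str → Spec_countHi2 str (countHi2 str)

-- ===== LEMMAS AND PROOFS =====

theorem countHi2Go_eq (l : List Char) (i : Nat) (count : Int) :
    countHi2Go l l.length i count = count + countHi2A (l.drop i) := by
  have H : ∀ k i (count : Int), l.length - i ≤ k →
      countHi2Go l l.length i count = count + countHi2A (l.drop i) := by
    intro k
    induction k with
    | zero =>
      intro i count h
      rw [countHi2Go, countHi2A]
      rw [if_neg (by omega), if_pos (by simp only [List.length_drop]; omega)]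
      ring
    | succ k ih =>
      intro i count h
      have hlen : (List.drop i l).length = l.length - i := by simp
      rw [countHi2Go]
      by_cases h2 : l.length - i ≥ 2
      · rw [if_pos h2]
        conv_rhs => rw [countHi2A]
        have hnot : ¬((List.drop i l).length < 2) := by omega
        rw [if_neg hnot]
        by_cases hx : l[i]? = some 'x'
        · have hx' : (List.drop i l)[0]? = some 'x' := by
            rw [List.getElem?_drop]; simpa using hx
          rw [if_pos hx, if_pos hx']
          by_cases h3 : l.length - i > 2
          · have h3' : (List.drop i l).length > 2 := by omega
            rw [if_pos h3, if_pos h3', ih _ _ (by omega), List.drop_drop]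
          · have h3' : ¬((List.drop i l).length > 2) := by omega
            rw [if_neg h3, if_neg h3', ih _ _ (by omega)]
            simp
            rw [show i + (l.length - i) = l.length from by omega]
            simp
        · have hx' : ¬((List.drop i l)[0]? = some 'x') := by
            rw [List.getElem?_drop]; simpa using hx
          rw [if_neg hx, if_neg hx']
          by_cases hhi : List.take 2 (List.drop i l) = ['h', 'i']
          · rw [if_pos hhi, if_pos hhi, ih _ _ (by omega), List.drop_drop]
            ring
          · rw [if_neg hhi, if_neg hhi, ih _ _ (by omega), List.drop_drop]
      · rw [if_neg h2, countHi2A, if_pos (show (List.drop i l).length < 2 by omega)]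
        ring
  exact H _ i count (le_refl _)

-- ===== VERDICT (by name: the statement is the Claim_ definition above) =====
theorem countHi2_spec : Claim_equal_countHi2 := by
  intro str _
  unfold Spec_countHi2 countHi2 countHi2_alt
  rw [countHi2Go_eq]
  simp
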